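-- pv_equiv track=rewrite | github.com/Antonio-Stradiavanti/StudyCode | Python/Discrete math/Ref.Nasonov/karno.py | perem2
-- ===== SOURCE A (Python) =====
-- def perem2(coordmas):
--     coords=[]
--     for i in coordmas:
--         if i[0]==0:
--             if i[1]==0:
--                 coords.append([0,0])
--             elif i[1]==1:
--                 coords.append([0,1])
--         else:
--             if i[1]==0:
--                 coords.append([1,0])
--             elif i[1]==1:
--                 coords.append([1,1])
--     x,y=coords[0]
--     for i in range(1,len(coords)):
--         if x!=coords[i][0] and x!=-1:
--             x=-1
--         if y!=coords[i][1] and y!=-1: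
--             y=-1
--     return[x,y]
-- ===== SOURCE B (Python) =====
-- def perem2(coordmas):
--     n = sx = sy = 0
--     for i in coordmas:
--         if i[1] == 0 or i[1] == 1:
--             n += 1
--             sx += 0 if i[0] == 0 else 1
--             sy += i[1]
--     x = 0 if sx == 0 else (1 if sx == n else -1)
--     y = 0 if sy == 0 else (1 if sy == n else -1)
--     return [x, y]
-- ===== Notes on version B (the rewrite author's own statement) =====
-- stated objective: alternative
-- what changed: Replaces building a normalized coords list plus a mutating -1-sentinel index scan by a single counting pass (kept-pair count and per-coordinate sums); constancy is decided arithmetically: sum 0 means all 0, sum equal to count means all 1, otherwise -1.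
import Mathlib
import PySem

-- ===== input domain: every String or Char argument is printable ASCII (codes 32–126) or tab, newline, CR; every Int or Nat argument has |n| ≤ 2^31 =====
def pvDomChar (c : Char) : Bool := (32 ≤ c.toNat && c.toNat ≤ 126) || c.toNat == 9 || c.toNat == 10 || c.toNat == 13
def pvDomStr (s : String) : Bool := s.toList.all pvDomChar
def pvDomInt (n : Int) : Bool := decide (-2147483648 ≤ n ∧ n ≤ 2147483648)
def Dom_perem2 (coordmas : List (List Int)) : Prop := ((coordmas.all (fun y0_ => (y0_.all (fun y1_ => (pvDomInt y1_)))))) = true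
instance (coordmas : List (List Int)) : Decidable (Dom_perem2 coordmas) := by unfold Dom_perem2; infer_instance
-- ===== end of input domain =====

-- B replaces A's normalized-coords list and mutating -1-sentinel index scan by a single
-- counting pass (kept count and per-coordinate sums), deciding constancy arithmetically.


-- ===== PORT A =====
-- i[0], i[1], coords[0], coords[i] are total pyGetD with a junk default: Pre_perem2
-- guarantees every index is in range, so the port is exact on Pre_.
def perem2 (coordmas : List (List Int)) : List Int :=
  let coords : List (List Int) := coordmas.foldl (fun coords i =>
    if PySem.List.pyGetD i 0 0 = 0 then
      if PySem.List.pyGetD i 1 0 = 0 then coords ++ [[0, 0]]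
      else if PySem.List.pyGetD i 1 0 = 1 then coords ++ [[0, 1]]
      else coords
    else
      if PySem.List.pyGetD i 1 0 = 0 then coords ++ [[1, 0]]
      else if PySem.List.pyGetD i 1 0 = 1 then coords ++ [[1, 1]]
      else coords) []
  let x := PySem.List.pyGetD (PySem.List.pyGetD coords 0 []) 0 0
  let y := PySem.List.pyGetD (PySem.List.pyGetD coords 0 []) 1 0
  let p := (PySem.List.pyRange 1 (coords.length : Int) 1).foldl (fun (p : Int × Int) i =>
    let ci := PySem.List.pyGetD coords i []
    (if p.1 ≠ PySem.List.pyGetD ci 0 0 ∧ p.1 ≠ -1 then -1 else p.1,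
     if p.2 ≠ PySem.List.pyGetD ci 1 0 ∧ p.2 ≠ -1 then -1 else p.2)) (x, y)
  [p.1, p.2]

-- ===== PORT B =====
def perem2_alt (coordmas : List (List Int)) : List Int :=
  let s : Int × Int × Int := coordmas.foldl (fun (s : Int × Int × Int) i =>
    if PySem.List.pyGetD i 1 0 = 0 ∨ PySem.List.pyGetD i 1 0 = 1 then
      (s.1 + 1,
       s.2.1 + (if PySem.List.pyGetD i 0 0 = 0 then 0 else 1),
       s.2.2 + PySem.List.pyGetD i 1 0)
    else s) (0, 0, 0)
  let x : Int := if s.2.1 = 0 then 0 else if s.2.1 = s.1 then 1 else -1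
  let y : Int := if s.2.2 = 0 then 0 else if s.2.2 = s.1 then 1 else -1
  [x, y]

-- ===== PRECONDITION & SPEC =====
-- Pre_ excludes exactly the inputs where Python A raises: an inner list shorter than 2
-- (IndexError on i[0]/i[1]) or no pair with second component 0/1 (IndexError on coords[0]).
def Pre_perem2 (coordmas : List (List Int)) : Prop :=
  (∀ i ∈ coordmas, 2 ≤ i.length) ∧
  (∃ i ∈ coordmas, PySem.List.pyGetD i 1 0 = 0 ∨ PySem.List.pyGetD i 1 0 = 1)
instance (coordmas : List (List Int)) : Decidable (Pre_perem2 coordmas) := by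
  unfold Pre_perem2; infer_instance
def pvWitness_perem2 : List (List Int) := [[0, 1], [2, 0]]

def Spec_perem2 (coordmas : List (List Int)) (out : List Int) : Prop := out = perem2_alt coordmas
instance (coordmas : List (List Int)) (out : List Int) : Decidable (Spec_perem2 coordmas out) := by unfold Spec_perem2; infer_instance

-- ===== CLAIM (what is proved, stated in full; the proofs are below) =====
def Claim_equal_perem2 : Prop := ∀ (coordmas : List (List Int)), Dom_perem2 coordmas → Pre_perem2 coordmas → Spec_perem2 coordmas (perem2 coordmas)

-- ===== LEMMAS AND PROOFS =====

-- the normalized pair of an input row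
def pvNorm (i : List Int) : Int × Int :=
  (if PySem.List.pyGetD i 0 0 = 0 then (0 : Int) else 1, PySem.List.pyGetD i 1 0)

def pvKeep (i : List Int) : Bool :=
  PySem.List.pyGetD i 1 0 == 0 || PySem.List.pyGetD i 1 0 == 1

def pvM (coordmas : List (List Int)) : List (Int × Int) :=
  (coordmas.filter pvKeep).map pvNorm

-- A's first loop builds exactly the [x, y]-lists of the normalized pairs
theorem pvA_coords (coordmas : List (List Int)) : ∀ acc : List (List Int),
    coordmas.foldl (fun coords i =>
      if PySem.List.pyGetD i 0 0 = 0 then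
        if PySem.List.pyGetD i 1 0 = 0 then coords ++ [[0, 0]]
        else if PySem.List.pyGetD i 1 0 = 1 then coords ++ [[0, 1]]
        else coords
      else
        if PySem.List.pyGetD i 1 0 = 0 then coords ++ [[1, 0]]
        else if PySem.List.pyGetD i 1 0 = 1 then coords ++ [[1, 1]]
        else coords) acc
    = acc ++ (pvM coordmas).map (fun p => [p.1, p.2]) := by
  induction coordmas with
  | nil => intro acc; simp [pvM]
  | cons i rest ih =>
    intro acc
    simp only [List.foldl_cons, ih, pvM, pvKeep, List.filter_cons]
    by_cases h0 : PySem.List.pyGetD i 0 0 = 0 <;>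
      by_cases hb0 : PySem.List.pyGetD i 1 0 = 0 <;>
      by_cases hb1 : PySem.List.pyGetD i 1 0 = 1 <;>
      simp_all [pvNorm]

-- B's counting loop computes (count, sum of xs, sum of ys) over the normalized pairs
theorem pvB_counts (coordmas : List (List Int)) : ∀ s0 : Int × Int × Int,
    coordmas.foldl (fun (s : Int × Int × Int) i =>
      if PySem.List.pyGetD i 1 0 = 0 ∨ PySem.List.pyGetD i 1 0 = 1 then
        (s.1 + 1,
         s.2.1 + (if PySem.List.pyGetD i 0 0 = 0 then 0 else 1),
         s.2.2 + PySem.List.pyGetD i 1 0)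
      else s) s0
    = (s0.1 + (pvM coordmas).length,
       s0.2.1 + ((pvM coordmas).map Prod.fst).sum,
       s0.2.2 + ((pvM coordmas).map Prod.snd).sum) := by
  induction coordmas with
  | nil => intro s0; simp [pvM]
  | cons i rest ih =>
    intro s0
    simp only [List.foldl_cons, ih, pvM, pvKeep, List.filter_cons]
    by_cases hb0 : PySem.List.pyGetD i 1 0 = 0 <;>
      by_cases hb1 : PySem.List.pyGetD i 1 0 = 1 <;>
      simp_all [pvNorm, Prod.mk.injEq] <;> push_cast <;> omega

-- one step of A's sentinel scan, per component
def pvStep (x a : Int) : Int := if x ≠ a ∧ x ≠ -1 then -1 else x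

theorem pvStep_neg_one (a : Int) : pvStep (-1) a = -1 := by simp [pvStep]

theorem pvFold_neg_one (l : List Int) : l.foldl pvStep (-1) = -1 := by
  induction l with
  | nil => rfl
  | cons a l ih => simpa [pvStep_neg_one] using ih

-- A's sentinel fold computes constancy
theorem pvFold_const (l : List Int) (x0 : Int) :
    l.foldl pvStep x0 = if ∀ a ∈ l, a = x0 then x0 else -1 := by
  induction l with
  | nil => simp
  | cons a l ih =>
    by_cases ha : a = x0
    · subst ha
      simp only [List.foldl_cons]
      have hs : pvStep a a = a := by simp [pvStep]
      rw [hs, ih]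
      by_cases h : ∀ b ∈ l, b = a <;> simp [h]
    · have hs : pvStep x0 a = -1 := by
        unfold pvStep
        by_cases hx : x0 = -1
        · simp [hx]
        · rw [if_pos ⟨fun h => ha h.symm, hx⟩]
      have hna : ¬ ∀ b ∈ a :: l, b = x0 := fun h => ha (h a (by simp))
      rw [List.foldl_cons, hs, pvFold_neg_one, if_neg hna]

-- A's pair fold splits into two component folds
theorem pvFold_pair (l : List (Int × Int)) : ∀ init : Int × Int,
    l.foldl (fun (p : Int × Int) (q : Int × Int) =>
        (if p.1 ≠ q.1 ∧ p.1 ≠ -1 then -1 else p.1,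
         if p.2 ≠ q.2 ∧ p.2 ≠ -1 then -1 else p.2)) init
    = ((l.map Prod.fst).foldl pvStep init.1, (l.map Prod.snd).foldl pvStep init.2) := by
  induction l with
  | nil => intro init; rfl
  | cons q l ih => intro init; simp only [List.foldl_cons, List.map_cons, ih]; rfl

-- for 0/1-valued lists, sum = 0 iff all elements are 0, sum = length iff all are 1
theorem pvSum_zero (l : List Int) (h : ∀ a ∈ l, a = 0 ∨ a = 1) :
    (l.sum = 0 ↔ ∀ a ∈ l, a = 0) := by
  induction l with
  | nil => simp
  | cons a l ih =>
    have ha := h a (by simp)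
    have hl := ih (fun b hb => h b (by simp [hb]))
    have hnn : 0 ≤ l.sum := List.sum_nonneg (fun b hb => by rcases h b (by simp [hb]) with h' | h' <;> omega)
    constructor
    · intro hs
      have : a = 0 ∧ l.sum = 0 := by rcases ha with h' | h' <;> simp [h'] at hs ⊢ <;> omega
      intro b hb; rcases List.mem_cons.1 hb with rfl | hb
      · exact this.1
      · exact (hl.1 this.2) b hb
    · intro hall
      have h0 : a = 0 := hall a (by simp)
      have : l.sum = 0 := hl.2 (fun b hb => hall b (by simp [hb]))
      simp [h0, this]
theorem pvSum_le (l : List Int) (h : ∀ a ∈ l, a = 0 ∨ a = 1) :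
    l.sum ≤ l.length := by
  induction l with
  | nil => simp
  | cons b t iht =>
    have hb := h b (by simp)
    have := iht (fun c hc => h c (by simp [hc]))
    simp only [List.sum_cons, List.length_cons]
    push_cast
    omega
theorem pvSum_len (l : List Int) (h : ∀ a ∈ l, a = 0 ∨ a = 1) :
    (l.sum = l.length ↔ ∀ a ∈ l, a = 1) := by
  induction l with
  | nil => simp
  | cons a l ih =>
    have ha := h a (by simp)
    have hl := ih (fun b hb => h b (by simp [hb]))
    have hub : l.sum ≤ l.length := pvSum_le l (fun b hb => h b (by simp [hb]))
    constructor
    · intro hs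
      simp only [List.sum_cons, List.length_cons] at hs
      push_cast at hs
      have h1 : a = 1 ∧ l.sum = l.length := by rcases ha with h' | h' <;> constructor <;> omega
      intro b hb; rcases List.mem_cons.1 hb with rfl | hb
      · exact h1.1
      · exact (hl.1 h1.2) b hb
    · intro hall
      have h1 : a = 1 := hall a (by simp)
      have : l.sum = l.length := hl.2 (fun b hb => hall b (by simp [hb]))
      simp [h1, this]; push_cast; omega

-- normalized pairs are 0/1-valued
theorem pvM_bounds (coordmas : List (List Int)) :
    ∀ p ∈ pvM coordmas, (p.1 = 0 ∨ p.1 = 1) ∧ (p.2 = 0 ∨ p.2 = 1) := by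
  intro p hp
  unfold pvM at hp
  obtain ⟨i, hi, rfl⟩ := List.mem_map.1 hp
  have hk := (List.mem_filter.1 hi).2
  unfold pvKeep at hk
  unfold pvNorm
  constructor
  · by_cases h : PySem.List.pyGetD i 0 0 = 0 <;> simp [h]
  · simp only [Bool.or_eq_true, beq_iff_eq] at hk
    exact hk

-- the arithmetical constancy test agrees with the sentinel fold on a nonempty 0/1 list
theorem pvArith_const (m : Int) (t : List Int)
    (h : ∀ a ∈ m :: t, a = 0 ∨ a = 1) :
    (if (m :: t).sum = 0 then (0 : Int)
     else if (m :: t).sum = (m :: t).length then 1 else -1)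
    = (if ∀ a ∈ t, a = m then m else -1) := by
  by_cases hs0 : (m :: t).sum = 0
  · have hall := (pvSum_zero _ h).1 hs0
    have hm : m = 0 := hall m (by simp)
    have hmt : ∀ a ∈ t, a = m := fun a ha => by rw [hm]; exact hall a (by simp [ha])
    rw [if_pos hs0, if_pos hmt, hm]
  · by_cases hsl : (m :: t).sum = (m :: t).length
    · have hall := (pvSum_len _ h).1 hsl
      have hm : m = 1 := hall m (by simp)
      have hmt : ∀ a ∈ t, a = m := fun a ha => by rw [hm]; exact hall a (by simp [ha])
      rw [if_neg hs0, if_pos hsl, if_pos hmt, hm]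
    · have hne : ¬ ∀ a ∈ t, a = m := by
        intro hall
        have hc : ∀ a ∈ m :: t, a = m := by
          intro a ha; rcases List.mem_cons.1 ha with rfl | ha
          · rfl
          · exact hall a ha
        rcases h m (by simp) with hm | hm
        · exact hs0 ((pvSum_zero _ h).2 (fun a ha => (hc a ha).trans hm))
        · exact hsl ((pvSum_len _ h).2 (fun a ha => (hc a ha).trans hm))
      rw [if_neg hs0, if_neg hsl, if_neg hne]

-- Pre_ makes the normalized list nonempty
theorem pvM_ne_nil (coordmas : List (List Int)) (h : Pre_perem2 coordmas) :
    pvM coordmas ≠ [] := by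
  obtain ⟨-, i, hi, hv⟩ := h
  have hmem : i ∈ coordmas.filter pvKeep := by
    rw [List.mem_filter]
    refine ⟨hi, ?_⟩
    unfold pvKeep
    rcases hv with hv | hv <;> simp [hv]
  intro hnil
  unfold pvM at hnil
  rw [List.map_eq_nil_iff] at hnil
  rw [hnil] at hmem
  simp at hmem

-- ===== VERDICT (by name: the statement is the Claim_ definition above) =====
set_option maxHeartbeats 1000000 in
theorem perem2_spec : Claim_equal_perem2 := by
  intro coordmas _ hpre
  unfold Spec_perem2
  simp only [perem2, perem2_alt]
  rw [pvA_coords coordmas [], List.nil_append, pvB_counts coordmas (0, 0, 0)]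
  simp only [zero_add]
  obtain ⟨m, t, hmt⟩ := List.exists_cons_of_ne_nil (pvM_ne_nil coordmas hpre)
  rw [hmt]
  rw [PySem.List.foldl_pyRange_pyGetD' ((m :: t).map (fun p : Int × Int => [p.1, p.2])) []
      (fun (p : Int × Int) (ci : List Int) =>
        (if p.1 ≠ PySem.List.pyGetD ci 0 0 ∧ p.1 ≠ -1 then -1 else p.1,
         if p.2 ≠ PySem.List.pyGetD ci 1 0 ∧ p.2 ≠ -1 then -1 else p.2))
      _ (by norm_num)]
  rw [show ((m :: t).map (fun p : Int × Int => [p.1, p.2])).drop (1 : Int).toNat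
      = t.map (fun p : Int × Int => [p.1, p.2]) from by simp]
  have hx0 : PySem.List.pyGetD (PySem.List.pyGetD
      ((m :: t).map (fun p : Int × Int => [p.1, p.2])) 0 []) 0 0 = m.1 := by
    rw [List.map_cons, PySem.List.pyGetD_zero_cons, PySem.List.pyGetD_zero_cons]
  have hy0 : PySem.List.pyGetD (PySem.List.pyGetD
      ((m :: t).map (fun p : Int × Int => [p.1, p.2])) 0 []) 1 0 = m.2 := by
    rw [List.map_cons, PySem.List.pyGetD_zero_cons, PySem.List.pyGetD_ofNat' [m.1, m.2] 1 0]
    rfl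
  rw [hx0, hy0]
  have hfold : (t.map (fun p : Int × Int => [p.1, p.2])).foldl
      (fun (p : Int × Int) (ci : List Int) =>
        (if p.1 ≠ PySem.List.pyGetD ci 0 0 ∧ p.1 ≠ -1 then -1 else p.1,
         if p.2 ≠ PySem.List.pyGetD ci 1 0 ∧ p.2 ≠ -1 then -1 else p.2)) (m.1, m.2)
      = t.foldl (fun (p : Int × Int) (q : Int × Int) =>
        (if p.1 ≠ q.1 ∧ p.1 ≠ -1 then -1 else p.1,
         if p.2 ≠ q.2 ∧ p.2 ≠ -1 then -1 else p.2)) (m.1, m.2) := by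
    rw [List.foldl_map]
    congr 1
  rw [hfold, pvFold_pair, pvFold_const, pvFold_const]
  have hb := pvM_bounds coordmas
  rw [hmt] at hb
  have hbx : ∀ a ∈ m.1 :: t.map Prod.fst, a = 0 ∨ a = 1 := by
    intro a ha
    rcases List.mem_cons.1 ha with rfl | ha
    · exact (hb m (by simp)).1
    · obtain ⟨p, hp, rfl⟩ := List.mem_map.1 ha
      exact (hb p (by simp [hp])).1
  have hby : ∀ a ∈ m.2 :: t.map Prod.snd, a = 0 ∨ a = 1 := by
    intro a ha
    rcases List.mem_cons.1 ha with rfl | ha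
    · exact (hb m (by simp)).2
    · obtain ⟨p, hp, rfl⟩ := List.mem_map.1 ha
      exact (hb p (by simp [hp])).2
  have ex := pvArith_const m.1 (t.map Prod.fst) hbx
  have ey := pvArith_const m.2 (t.map Prod.snd) hby
  simp only [List.map_cons, List.sum_cons, List.length_cons] at ex ey ⊢
  simp only [List.length_map] at ex ey
  exact congrArg₂ (fun u v => ([u, v] : List Int)) ex.symm ey.symm
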